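-- pv_equiv track=rewrite | github.com/govtech-responsibleai/kaleidoscope | backend/src/scoring/services/claim_processor.py | _find_complete_bracket_groups
-- ===== SOURCE A (Python) =====
-- def _find_complete_bracket_groups(text: str) -> str:
--     """
--     Find all consecutive complete bracket groups at the start of text.
--
--     A bracket group is complete if it has an opening bracket and any closing bracket.
--     Handles nested brackets by tracking depth. Stops at first incomplete group.
--
--     Args:
--         text: Input text to check for leading bracket groups
--
--     Returns:
--         The bracket content to shift (e.g., "(first) (second) "), or empty string if none.
--
--     Examples:
--         "(a) (b) rest" -> "(a) (b) "
--         "(nested (inner) end)" -> "(nested (inner) end)"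
--         "(incomplete" -> ""
--     """
--     OPENING_BRACKETS = frozenset('([{<')
--     CLOSING_BRACKETS = frozenset(')]}>')
--
--     pos = 0
--     shifted_content = ""
--
--     while pos < len(text):
--         # Check if current position starts with opening bracket
--         if pos >= len(text) or text[pos] not in OPENING_BRACKETS:
--             break  # No more bracket groups at start
--
--         # Find the matching closing bracket (any type)
--         depth = 0
--         start = pos
--         found_closing = False
--
--         for i in range(pos, len(text)):
--             if text[i] in OPENING_BRACKETS:
--                 depth += 1
--             elif text[i] in CLOSING_BRACKETS:
--                 depth -= 1
--                 if depth == 0: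
--                     # Found complete bracket group
--                     shifted_content += text[start:i+1]
--                     pos = i + 1
--                     found_closing = True
--                     break
--
--         if not found_closing:
--             break  # Incomplete bracket group, stop
--
--     return shifted_content
-- ===== SOURCE B (Python) =====
-- def _find_complete_bracket_groups(text: str) -> str:
--     depth = 0
--     end = 0
--     for i, ch in enumerate(text):
--         if depth == 0:
--             if ch in '([{<':
--                 depth = 1
--             else:
--                 break
--         else:
--             if ch in '([{<':
--                 depth += 1
--             elif ch in ')]}>':
--                 depth -= 1
--                 if depth == 0:
--                     end = i + 1
--     return text[:end]
-- ===== Notes on version B (the rewrite author's own statement) =====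
-- stated objective: simpler
-- what changed: Replaced the nested while+for with re-entry positions, slice concatenation and a found_closing flag by one flat pass with a depth counter that records the end of the last completed leading group, returning a single prefix slice.
import Mathlib
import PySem

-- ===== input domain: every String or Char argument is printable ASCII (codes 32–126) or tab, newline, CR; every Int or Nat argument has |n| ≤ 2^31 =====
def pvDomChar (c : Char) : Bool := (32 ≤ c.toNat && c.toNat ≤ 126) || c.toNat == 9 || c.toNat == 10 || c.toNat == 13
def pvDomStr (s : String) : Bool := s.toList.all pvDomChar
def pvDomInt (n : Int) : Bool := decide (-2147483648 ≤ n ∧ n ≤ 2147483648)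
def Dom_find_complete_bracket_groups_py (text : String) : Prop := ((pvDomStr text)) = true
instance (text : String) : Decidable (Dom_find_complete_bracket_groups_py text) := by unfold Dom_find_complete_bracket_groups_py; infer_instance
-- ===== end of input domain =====

-- B is the same linear cost as A but a single flat pass (depth counter + recorded end index)
-- instead of A's nested while+for with re-entry positions, slice concatenation and a flag.

-- ===== PORT A =====
-- membership tests `c in OPENING_BRACKETS` / `c in CLOSING_BRACKETS`
def pvIsOpen (c : Char) : Bool := c = '(' || c = '[' || c = '{' || c = '<'
def pvIsClose (c : Char) : Bool := c = ')' || c = ']' || c = '}' || c = '>'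

-- A's inner `for i in range(pos, len(text))` loop: walks the remaining characters with the
-- running `depth`; on the closing bracket that brings depth to 0 it returns the consumed
-- group (A's slice text[start:i+1]) and the remainder (A resumes at pos = i+1);
-- `none` = the loop ran out without found_closing.
def pvScanA : List Char → Int → Option (List Char × List Char)
  | [], _ => none
  | c :: rest, depth =>
    if pvIsOpen c then (pvScanA rest (depth + 1)).map (fun p => (c :: p.1, p.2))
    else if pvIsClose c then
      if depth - 1 = 0 then some ([c], rest)
      else (pvScanA rest (depth - 1)).map (fun p => (c :: p.1, p.2))
    else (pvScanA rest depth).map (fun p => (c :: p.1, p.2))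

-- needed by loopA's decreasing_by: a found group is a nonempty prefix
theorem pvScanA_split : ∀ (cs : List Char) (d : Int) (g rest : List Char),
    pvScanA cs d = some (g, rest) → cs = g ++ rest ∧ 0 < g.length := by
  intro cs
  induction cs with
  | nil => intro d g rest h; simp [pvScanA] at h
  | cons c cs ih =>
    intro d g rest h
    simp only [pvScanA] at h
    split_ifs at h with h1 h2 h3
    · cases hsc : pvScanA cs (d + 1) with
      | none => rw [hsc] at h; simp at h
      | some p =>
        rw [hsc] at h; simp at h
        obtain ⟨hg, hr⟩ := h
        obtain ⟨he, _⟩ := ih (d + 1) p.1 p.2 (by simpa using hsc)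
        subst hg hr; simp [he]
    · simp at h; obtain ⟨hg, hr⟩ := h; subst hg hr; simp
    · cases hsc : pvScanA cs (d - 1) with
      | none => rw [hsc] at h; simp at h
      | some p =>
        rw [hsc] at h; simp at h
        obtain ⟨hg, hr⟩ := h
        obtain ⟨he, _⟩ := ih (d - 1) p.1 p.2 (by simpa using hsc)
        subst hg hr; simp [he]
    · cases hsc : pvScanA cs d with
      | none => rw [hsc] at h; simp at h
      | some p =>
        rw [hsc] at h; simp at h
        obtain ⟨hg, hr⟩ := h
        obtain ⟨he, _⟩ := ih d p.1 p.2 (by simpa using hsc)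
        subst hg hr; simp [he]

-- A's outer `while pos < len(text)` loop; acc is shifted_content
def pvLoopA (cs acc : List Char) : List Char :=
  match cs with
  | [] => acc
  | c :: tl =>
    if pvIsOpen c then
      match hsc : pvScanA (c :: tl) 0 with
      | some (g, rest) => pvLoopA rest (acc ++ g)
      | none => acc
    else acc
termination_by cs.length
decreasing_by
  have h := pvScanA_split (c :: tl) 0 g rest hsc
  rw [h.1]; simp; omega

def find_complete_bracket_groups_py (text : String) : String :=
  String.mk (pvLoopA text.toList [])

-- ===== PORT B =====
-- B's single `for i, ch in enumerate(text)` pass: depth counter, `endi` records i+1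
-- whenever depth returns to 0; at depth 0 a non-opening char stops the loop.
def pvLoopB : List Char → Int → Nat → Nat → Nat
  | [], _, _, endi => endi
  | c :: rest, depth, i, endi =>
    if depth = 0 then
      if pvIsOpen c then pvLoopB rest 1 (i + 1) endi else endi
    else
      if pvIsOpen c then pvLoopB rest (depth + 1) (i + 1) endi
      else if pvIsClose c then
        if depth - 1 = 0 then pvLoopB rest 0 (i + 1) (i + 1)
        else pvLoopB rest (depth - 1) (i + 1) endi
      else pvLoopB rest depth (i + 1) endi

-- `return text[:end]`
def find_complete_bracket_groups_py_alt (text : String) : String :=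
  String.mk (text.toList.take (pvLoopB text.toList 0 0 0))

-- ===== PRECONDITION & SPEC =====
def Spec_find_complete_bracket_groups_py (text : String) (out : String) : Prop := out = find_complete_bracket_groups_py_alt text
instance (text : String) (out : String) : Decidable (Spec_find_complete_bracket_groups_py text out) := by unfold Spec_find_complete_bracket_groups_py; infer_instance

-- ===== CLAIM (what is proved, stated in full; the proofs are below) =====
def Claim_equal_find_complete_bracket_groups_py : Prop := ∀ (text : String), Dom_find_complete_bracket_groups_py text → Spec_find_complete_bracket_groups_py text (find_complete_bracket_groups_py text)

-- ===== LEMMAS AND PROOFS =====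

-- while inside a group (depth ≥ 1), if A's inner scan fails then B never resets depth to 0,
-- so the recorded end is returned unchanged
theorem pvLoopB_none : ∀ (cs : List Char) (d : Int) (i e : Nat), 1 ≤ d →
    pvScanA cs d = none → pvLoopB cs d i e = e := by
  intro cs
  induction cs with
  | nil => intro d i e _ _; simp [pvLoopB]
  | cons c cs ih =>
    intro d i e hd hsc
    simp only [pvScanA] at hsc
    have hdz : ¬ d = 0 := by omega
    simp only [pvLoopB, if_neg hdz]
    by_cases h1 : pvIsOpen c
    · rw [if_pos h1] at hsc ⊢
      cases hs : pvScanA cs (d + 1) with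
      | none => exact ih (d + 1) (i + 1) e (by omega) hs
      | some p => rw [hs] at hsc; simp at hsc
    · rw [if_neg h1] at hsc ⊢
      by_cases h2 : pvIsClose c
      · rw [if_pos h2] at hsc ⊢
        by_cases h3 : d - 1 = 0
        · rw [if_pos h3] at hsc; simp at hsc
        · rw [if_neg h3] at hsc ⊢
          cases hs : pvScanA cs (d - 1) with
          | none => exact ih (d - 1) (i + 1) e (by omega) hs
          | some p => rw [hs] at hsc; simp at hsc
      · rw [if_neg h2] at hsc ⊢
        cases hs : pvScanA cs d with
        | none => exact ih d (i + 1) e hd hs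
        | some p => rw [hs] at hsc; simp at hsc

-- while inside a group (depth ≥ 1), if A's inner scan returns (g, rest) then B consumes g,
-- records end = i + |g| and resumes at depth 0
theorem pvLoopB_some : ∀ (cs : List Char) (d : Int) (g rest : List Char) (i e : Nat), 1 ≤ d →
    pvScanA cs d = some (g, rest) →
    pvLoopB cs d i e = pvLoopB rest 0 (i + g.length) (i + g.length) := by
  intro cs
  induction cs with
  | nil => intro d g rest i e _ h; simp [pvScanA] at h
  | cons c cs ih =>
    intro d g rest i e hd hsc
    simp only [pvScanA] at hsc
    have hdz : ¬ d = 0 := by omega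
    simp only [pvLoopB, if_neg hdz]
    split_ifs at hsc ⊢ with h1 h2 h3
    · cases hs : pvScanA cs (d + 1) with
      | none => rw [hs] at hsc; simp at hsc
      | some p =>
        rw [hs] at hsc; simp at hsc
        obtain ⟨hg, hr⟩ := hsc; subst hg hr
        rw [ih (d + 1) p.1 p.2 (i + 1) e (by omega) hs]
        simp; ring_nf
    · simp at hsc; obtain ⟨hg, hr⟩ := hsc; subst hg hr; simp
    · cases hs : pvScanA cs (d - 1) with
      | none => rw [hs] at hsc; simp at hsc
      | some p =>
        rw [hs] at hsc; simp at hsc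
        obtain ⟨hg, hr⟩ := hsc; subst hg hr
        rw [ih (d - 1) p.1 p.2 (i + 1) e (by omega) hs]
        simp; ring_nf
    · cases hs : pvScanA cs d with
      | none => rw [hs] at hsc; simp at hsc
      | some p =>
        rw [hs] at hsc; simp at hsc
        obtain ⟨hg, hr⟩ := hsc; subst hg hr
        rw [ih d p.1 p.2 (i + 1) e (by omega) hs]
        simp; ring_nf

-- the returned end never drops below the recorded one
theorem pvLoopB_ge : ∀ (cs : List Char) (d : Int) (i e : Nat), e ≤ i →
    e ≤ pvLoopB cs d i e ∧ pvLoopB cs d i e ≤ i + cs.length := by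
  intro cs
  induction cs with
  | nil => intro d i e h; simp [pvLoopB, h]
  | cons c cs ih =>
    intro d i e h
    simp only [pvLoopB]
    simp only [List.length_cons]
    split_ifs with h1 h2 h3 h4 h5
    · have := ih 1 (i + 1) e (by omega); omega
    · omega
    · have := ih (d + 1) (i + 1) e (by omega); omega
    · have := ih 0 (i + 1) (i + 1) (by omega); omega
    · have := ih (d - 1) (i + 1) e (by omega); omega
    · have := ih d (i + 1) e (by omega); omega

-- main invariant: A's outer loop appends exactly the prefix of length (B's end − i)
theorem pvLoop_main : ∀ (n : Nat) (cs acc : List Char) (i : Nat), cs.length ≤ n →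
    pvLoopA cs acc = acc ++ cs.take (pvLoopB cs 0 i i - i) := by
  intro n
  induction n with
  | zero =>
    intro cs acc i hn
    have : cs = [] := List.eq_nil_of_length_eq_zero (by omega)
    subst this; rw [pvLoopA.eq_def]; simp [pvLoopB]
  | succ n ih =>
    intro cs acc i hn
    match cs with
    | [] => rw [pvLoopA.eq_def]; simp [pvLoopB]
    | c :: cs' =>
      by_cases hop : pvIsOpen c
      · have hB : pvLoopB (c :: cs') 0 i i = pvLoopB cs' 1 (i + 1) i := by
          simp [pvLoopB, hop]
        cases hsc : pvScanA (c :: cs') 0 with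
        | none =>
          have hsc' : pvScanA cs' 1 = none := by
            simp only [pvScanA, hop, if_pos] at hsc
            cases hs : pvScanA cs' (0 + 1) with
            | none => simpa using hs
            | some p => rw [hs] at hsc; simp at hsc
          have hA : pvLoopA (c :: cs') acc = acc := by
            rw [pvLoopA.eq_def]
            simp only [if_pos hop]
            split
            next g' rest' h => rw [h] at hsc; cases hsc
            next => rfl
          rw [hA, hB, pvLoopB_none cs' 1 (i + 1) i (by omega) hsc']
          simp
        | some p =>
          obtain ⟨g, rest⟩ := p
          have hA : pvLoopA (c :: cs') acc = pvLoopA rest (acc ++ g) := by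
            rw [pvLoopA.eq_def]
            simp only [if_pos hop]
            split
            next g' rest' h =>
              rw [h] at hsc
              simp only [Option.some.injEq, Prod.mk.injEq] at hsc
              rw [hsc.1, hsc.2]
            next h => rw [h] at hsc; cases hsc
          obtain ⟨heq, hlen⟩ := pvScanA_split (c :: cs') 0 g rest hsc
          -- g starts with c: pvScanA on c::cs' with open c recurses into cs' at depth 1
          have hg : ∃ g', g = c :: g' ∧ pvScanA cs' 1 = some (g', rest) := by
            simp only [pvScanA, hop, if_pos] at hsc
            cases hs : pvScanA cs' (0 + 1) with
            | none => rw [hs] at hsc; simp at hsc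
            | some q =>
              rw [hs] at hsc; simp at hsc
              exact ⟨q.1, hsc.1.symm, by rw [← hsc.2]; simpa using hs⟩
          obtain ⟨g', hgc, hsc'⟩ := hg
          rw [hA, hB, pvLoopB_some cs' 1 g' rest (i + 1) i (by omega) hsc']
          have hglen : g.length = g'.length + 1 := by rw [hgc]; simp
          set j := i + g.length with hj
          have hrlen : rest.length ≤ n := by
            have : (c :: cs').length = g.length + rest.length := by rw [heq]; simp
            simp at this hn; omega
          rw [ih rest (acc ++ g) j hrlen]
          have hje : i + 1 + g'.length = j := by omega
          rw [hje]
          have hge : j ≤ pvLoopB rest 0 j j := (pvLoopB_ge rest 0 j j le_rfl).1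
          have htake : (c :: cs').take (pvLoopB rest 0 j j - i) =
              g ++ rest.take (pvLoopB rest 0 j j - j) := by
            rw [heq]
            have : pvLoopB rest 0 j j - i = g.length + (pvLoopB rest 0 j j - j) := by omega
            rw [this, List.take_append]
            congr 1
            · exact List.take_of_length_le (by omega)
            · congr 1; omega
          rw [htake, List.append_assoc]
      · rw [pvLoopA.eq_def]
        simp [pvLoopB, hop]

-- ===== VERDICT (by name: the statement is the Claim_ definition above) =====
theorem find_complete_bracket_groups_py_spec : Claim_equal_find_complete_bracket_groups_py := by
  unfold Claim_equal_find_complete_bracket_groups_py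
  intro text _
  unfold Spec_find_complete_bracket_groups_py find_complete_bracket_groups_py find_complete_bracket_groups_py_alt
  rw [pvLoop_main text.toList.length text.toList [] 0 le_rfl]
  simp
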